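-- pv_equiv track=rewrite | github.com/sopyb/AoC | 2016/day_20/part1.py | lowest_unlocked_ip
-- ===== SOURCE A (Python) =====
-- def lowest_unlocked_ip(range_list):
--     range_list.sort()
--     lowest = 0
--     for start, end in range_list:
--         if lowest < start:
--             return lowest
--         elif lowest <= end:
--             lowest = end + 1
--     return lowest
-- ===== SOURCE B (Python) =====
-- def _merge(ranges):
--     # fold sorted ranges into maximal disjoint merged intervals
--     if len(ranges) >= 2:
--         (s1, e1), (s2, e2) = ranges[0], ranges[1]
--         if s2 <= e1 + 1:
--             return _merge([(s1, max(e1, e2))] + ranges[2:])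
--         return [ranges[0]] + _merge(ranges[1:])
--     return ranges
--
--
-- def lowest_unlocked_ip(range_list):
--     range_list.sort()
--     for s, e in _merge(range_list):
--         if s <= 0 <= e:
--             return e + 1
--     return 0
-- ===== Notes on version B (the rewrite author's own statement) =====
-- stated objective: alternative
-- what changed: B first folds the sorted ranges into maximal disjoint merged intervals (recursive merge with the +1 adjacency rule) and then simply returns end+1 of the unique merged interval containing 0 (or 0 if none), instead of A's fused sweep that tracks the lowest free IP while iterating the raw sorted ranges.
import Mathlib
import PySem

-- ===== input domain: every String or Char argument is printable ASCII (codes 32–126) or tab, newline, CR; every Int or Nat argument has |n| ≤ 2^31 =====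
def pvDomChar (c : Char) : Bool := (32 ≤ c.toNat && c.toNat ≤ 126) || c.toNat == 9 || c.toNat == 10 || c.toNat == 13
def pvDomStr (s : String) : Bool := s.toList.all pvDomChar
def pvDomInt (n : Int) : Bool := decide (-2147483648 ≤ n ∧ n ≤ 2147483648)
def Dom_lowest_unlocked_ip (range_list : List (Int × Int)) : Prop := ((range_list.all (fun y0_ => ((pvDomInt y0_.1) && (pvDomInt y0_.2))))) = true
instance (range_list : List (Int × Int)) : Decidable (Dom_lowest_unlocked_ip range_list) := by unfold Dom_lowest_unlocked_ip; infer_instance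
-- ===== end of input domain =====

-- B merges the sorted ranges into disjoint intervals first and returns end+1 of the interval
-- containing 0 (or 0); A fuses everything into one sweep tracking the lowest free IP.
-- Both call .sort(), mutating the argument in place; the equivalence is about the return value.

-- ===== PORT A =====
-- A's for-loop with early return, over the sorted list
def aLoop : List (Int × Int) → Int → Int
  | [], lowest => lowest
  | (start, stop) :: t, lowest =>
    if lowest < start then lowest
    else if lowest ≤ stop then aLoop t (stop + 1)
    else aLoop t lowest

def lowest_unlocked_ip (range_list : List (Int × Int)) : Int :=
  aLoop (PySem.List.sorted2 range_list Prod.fst Prod.snd) 0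

-- ===== PORT B =====
-- Source B's _merge: recursive merge of adjacent/overlapping sorted ranges
def bMerge : List (Int × Int) → List (Int × Int)
  | (s1, e1) :: (s2, e2) :: t =>
    if s2 ≤ e1 + 1 then bMerge ((s1, max e1 e2) :: t)
    else (s1, e1) :: bMerge ((s2, e2) :: t)
  | xs => xs
termination_by xs => xs.length

-- Source B's main loop: find the merged interval containing 0, return its end+1 (else 0)
def bFind : List (Int × Int) → Int
  | [] => 0
  | (s, e) :: t => if s ≤ 0 ∧ 0 ≤ e then e + 1 else bFind t

def lowest_unlocked_ip_alt (range_list : List (Int × Int)) : Int :=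
  bFind (bMerge (PySem.List.sorted2 range_list Prod.fst Prod.snd))

-- ===== PRECONDITION & SPEC =====
def Spec_lowest_unlocked_ip (range_list : List (Int × Int)) (out : Int) : Prop := out = lowest_unlocked_ip_alt range_list
instance (range_list : List (Int × Int)) (out : Int) : Decidable (Spec_lowest_unlocked_ip range_list out) := by unfold Spec_lowest_unlocked_ip; infer_instance

-- ===== CLAIM (what is proved, stated in full; the proofs are below) =====
def Claim_equal_lowest_unlocked_ip : Prop := ∀ (range_list : List (Int × Int)), Dom_lowest_unlocked_ip range_list → Spec_lowest_unlocked_ip range_list (lowest_unlocked_ip range_list)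

-- ===== LEMMAS AND PROOFS =====

-- A's sweep is insensitive to merging one adjacent/overlapping pair
theorem aLoop_merge_step (s1 e1 s2 e2 : Int) (t : List (Int × Int)) (l : Int)
    (h : s2 ≤ e1 + 1) :
    aLoop ((s1, max e1 e2) :: t) l = aLoop ((s1, e1) :: (s2, e2) :: t) l := by
  simp only [aLoop]
  split_ifs <;> first | rfl | omega | (congr 1; omega)

theorem aLoop_cons_congr (s e : Int) (ys zs : List (Int × Int)) (l : Int)
    (h : ∀ l', aLoop ys l' = aLoop zs l') :
    aLoop ((s, e) :: ys) l = aLoop ((s, e) :: zs) l := by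
  simp only [aLoop]
  split_ifs <;> first | rfl | exact h _

-- A's sweep over the merged list equals its sweep over the original list
theorem aLoop_bMerge : ∀ (xs : List (Int × Int)) (l : Int), aLoop (bMerge xs) l = aLoop xs l
  | [], l => by simp [bMerge]
  | [(s, e)], l => by simp [bMerge]
  | (s1, e1) :: (s2, e2) :: t, l => by
    by_cases h : s2 ≤ e1 + 1
    · rw [show bMerge ((s1, e1) :: (s2, e2) :: t) = bMerge ((s1, max e1 e2) :: t) from by
        rw [bMerge]; simp [h]]
      rw [aLoop_bMerge ((s1, max e1 e2) :: t) l]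
      exact aLoop_merge_step s1 e1 s2 e2 t l h
    · rw [show bMerge ((s1, e1) :: (s2, e2) :: t) = (s1, e1) :: bMerge ((s2, e2) :: t) from by
        rw [bMerge]; simp [h]]
      exact aLoop_cons_congr s1 e1 _ _ l (fun l' => aLoop_bMerge ((s2, e2) :: t) l')
termination_by xs _ => xs.length

-- sorted2's lexicographic comparator is the strict order of Int ×ₗ Int
theorem before_eq :
    (fun (a b : Int × Int) => (decide (a.1 < b.1) || (!decide (b.1 < a.1) && decide (a.2 < b.2))))
      = (fun (a b : Int × Int) => decide ((toLex a : Int ×ₗ Int) < toLex b)) := by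
  funext a b
  obtain ⟨a1, a2⟩ := a
  obtain ⟨b1, b2⟩ := b
  rw [Bool.eq_iff_iff]
  simp [Prod.Lex.lt_iff]
  omega

theorem sorted2_eq (xs : List (Int × Int)) :
    PySem.List.sorted2 xs Prod.fst Prod.snd
      = xs.foldl (fun acc x => PySem.List.insertBy (fun a b => decide ((toLex a : Int ×ₗ Int) < toLex b)) x acc) [] := by
  have h : PySem.List.sorted2 xs Prod.fst Prod.snd
      = xs.foldl (fun acc x => PySem.List.insertBy
          (fun (a b : Int × Int) => (decide (a.1 < b.1) || (!decide (b.1 < a.1) && decide (a.2 < b.2)))) x acc) [] := rfl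
  rw [h, before_eq]

theorem foldl_insertBy_pairwise (xs : List (Int × Int)) :
    ∀ acc : List (Int × Int), acc.Pairwise (fun a b => (toLex a : Int ×ₗ Int) ≤ toLex b) →
    (xs.foldl (fun acc x => PySem.List.insertBy (fun a b => decide ((toLex a : Int ×ₗ Int) < toLex b)) x acc) acc).Pairwise
      (fun a b => (toLex a : Int ×ₗ Int) ≤ toLex b) := by
  induction xs with
  | nil => intro acc h; exact h
  | cons x t ih =>
    intro acc h
    exact ih _ (PySem.List.insertBy_pairwise_le (fun p : Int × Int => (toLex p : Int ×ₗ Int)) x acc h)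

-- the sorted list is nondecreasing in the first component
theorem sorted_fst_pairwise (xs : List (Int × Int)) :
    (PySem.List.sorted2 xs Prod.fst Prod.snd).Pairwise (fun a b => a.1 ≤ b.1) := by
  rw [sorted2_eq]
  refine (foldl_insertBy_pairwise xs [] (by simp)).imp ?_
  intro a b hab
  rw [Prod.Lex.le_iff] at hab
  rcases hab with h | ⟨h, _⟩
  · exact le_of_lt h
  · exact le_of_eq h

-- each first component in the merged list comes from the input
theorem bMerge_fst_mem : ∀ (xs : List (Int × Int)), ∀ q ∈ bMerge xs, ∃ p ∈ xs, p.1 = q.1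
  | [], q, hq => by simp [bMerge] at hq
  | [(s, e)], q, hq => by simp [bMerge] at hq; exact ⟨(s, e), by simp, by simp [hq]⟩
  | (s1, e1) :: (s2, e2) :: t, q, hq => by
    by_cases h : s2 ≤ e1 + 1
    · rw [show bMerge ((s1, e1) :: (s2, e2) :: t) = bMerge ((s1, max e1 e2) :: t) from by
        rw [bMerge]; simp [h]] at hq
      obtain ⟨p, hp, hpq⟩ := bMerge_fst_mem ((s1, max e1 e2) :: t) q hq
      rcases List.mem_cons.mp hp with rfl | hp
      · exact ⟨(s1, e1), by simp, hpq⟩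
      · exact ⟨p, by simp [hp], hpq⟩
    · rw [show bMerge ((s1, e1) :: (s2, e2) :: t) = (s1, e1) :: bMerge ((s2, e2) :: t) from by
        rw [bMerge]; simp [h]] at hq
      rcases List.mem_cons.mp hq with rfl | hq
      · exact ⟨(s1, e1), by simp, rfl⟩
      · obtain ⟨p, hp, hpq⟩ := bMerge_fst_mem ((s2, e2) :: t) q hq
        exact ⟨p, by simp [List.mem_cons.mp hp], hpq⟩
termination_by xs => xs.length

-- merging preserves "nondecreasing first components"
theorem bMerge_pairwise : ∀ (xs : List (Int × Int)),
    xs.Pairwise (fun a b => a.1 ≤ b.1) → (bMerge xs).Pairwise (fun a b => a.1 ≤ b.1)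
  | [], h => by simp [bMerge]
  | [(s, e)], h => by simp [bMerge]
  | (s1, e1) :: (s2, e2) :: t, h => by
    rw [List.pairwise_cons] at h
    obtain ⟨h1, h2⟩ := h
    rw [List.pairwise_cons] at h2
    obtain ⟨h2a, h2b⟩ := h2
    by_cases hg : s2 ≤ e1 + 1
    · rw [show bMerge ((s1, e1) :: (s2, e2) :: t) = bMerge ((s1, max e1 e2) :: t) from by
        rw [bMerge]; simp [hg]]
      exact bMerge_pairwise ((s1, max e1 e2) :: t)
        (List.pairwise_cons.mpr ⟨fun p hp => h1 p (by simp [hp]), h2b⟩)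
    · rw [show bMerge ((s1, e1) :: (s2, e2) :: t) = (s1, e1) :: bMerge ((s2, e2) :: t) from by
        rw [bMerge]; simp [hg]]
      refine List.pairwise_cons.mpr ⟨?_, bMerge_pairwise ((s2, e2) :: t) (List.pairwise_cons.mpr ⟨h2a, h2b⟩)⟩
      intro q hq
      obtain ⟨p, hp, hpq⟩ := bMerge_fst_mem ((s2, e2) :: t) q hq
      rw [← hpq]
      exact h1 p hp
termination_by xs => xs.length

-- the merged list keeps its head's first component
theorem bMerge_head : ∀ (s e : Int) (t : List (Int × Int)),
    ∃ e' rest, bMerge ((s, e) :: t) = (s, e') :: rest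
  | s, e, [] => ⟨e, [], by simp [bMerge]⟩
  | s, e, (s2, e2) :: t => by
    by_cases h : s2 ≤ e + 1
    · rw [show bMerge ((s, e) :: (s2, e2) :: t) = bMerge ((s, max e e2) :: t) from by
        rw [bMerge]; simp [h]]
      exact bMerge_head s (max e e2) t
    · exact ⟨e, bMerge ((s2, e2) :: t), by rw [bMerge]; simp [h]⟩
termination_by _ _ t => t.length

-- merged intervals are separated by gaps of at least 2
def Gapped : List (Int × Int) → Prop
  | a :: b :: t => a.2 + 1 < b.1 ∧ Gapped (b :: t)
  | _ => True

theorem Gapped_tail : ∀ (a : Int × Int) (l : List (Int × Int)), Gapped (a :: l) → Gapped l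
  | _, [], _ => trivial
  | _, _ :: _, h => h.2

theorem bMerge_gapped : ∀ (xs : List (Int × Int)), Gapped (bMerge xs)
  | [] => by simp [bMerge, Gapped]
  | [(s, e)] => by simp [bMerge, Gapped]
  | (s1, e1) :: (s2, e2) :: t => by
    by_cases h : s2 ≤ e1 + 1
    · rw [show bMerge ((s1, e1) :: (s2, e2) :: t) = bMerge ((s1, max e1 e2) :: t) from by
        rw [bMerge]; simp [h]]
      exact bMerge_gapped ((s1, max e1 e2) :: t)
    · rw [show bMerge ((s1, e1) :: (s2, e2) :: t) = (s1, e1) :: bMerge ((s2, e2) :: t) from by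
        rw [bMerge]; simp [h]]
      obtain ⟨e', rest, heq⟩ := bMerge_head s2 e2 t
      have ih := bMerge_gapped ((s2, e2) :: t)
      rw [heq] at ih ⊢
      exact ⟨by omega, ih⟩
termination_by xs => xs.length

theorem bFind_zero : ∀ (t : List (Int × Int)), (∀ p ∈ t, 0 < p.1) → bFind t = 0
  | [], _ => rfl
  | (s, e) :: t, h => by
    have hs : 0 < s := h (s, e) (by simp)
    simp only [bFind, if_neg (by omega : ¬ (s ≤ 0 ∧ 0 ≤ e))]
    exact bFind_zero t (fun p hp => h p (by simp [hp]))

-- on a sorted, gap-separated list, A's sweep from 0 finds exactly B's answer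
theorem scan_eq_find : ∀ (ms : List (Int × Int)),
    ms.Pairwise (fun a b => a.1 ≤ b.1) → Gapped ms →
    aLoop ms 0 = bFind ms
  | [], _, _ => rfl
  | (s, e) :: t, hp, hc => by
    rw [List.pairwise_cons] at hp
    obtain ⟨h1, h2⟩ := hp
    by_cases h0 : 0 < s
    · rw [show bFind ((s, e) :: t) = bFind t from by
        simp only [bFind]; rw [if_neg (show ¬ (s ≤ 0 ∧ 0 ≤ e) by omega)]]
      rw [bFind_zero t (fun p hp => by have := h1 p hp; omega)]
      simp [aLoop, h0]
    · by_cases he : 0 ≤ e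
      · rw [show bFind ((s, e) :: t) = e + 1 from by
          simp only [bFind]; rw [if_pos (show s ≤ 0 ∧ 0 ≤ e by omega)]]
        simp only [aLoop, if_neg h0, if_pos he]
        match t, hc with
        | [], _ => rfl
        | (s', e') :: t', hc =>
          have hrel : e + 1 < s' := hc.1
          simp [aLoop, hrel]
      · rw [show bFind ((s, e) :: t) = bFind t from by
          simp only [bFind]; rw [if_neg (show ¬ (s ≤ 0 ∧ 0 ≤ e) by omega)]]
        simp only [aLoop, if_neg h0, if_neg he]
        exact scan_eq_find t h2 (Gapped_tail _ _ hc)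

-- ===== VERDICT (by name: the statement is the Claim_ definition above) =====
theorem lowest_unlocked_ip_spec : Claim_equal_lowest_unlocked_ip := by
  intro range_list _
  unfold Spec_lowest_unlocked_ip lowest_unlocked_ip lowest_unlocked_ip_alt
  rw [← aLoop_bMerge]
  exact scan_eq_find _ (bMerge_pairwise _ (sorted_fst_pairwise range_list)) (bMerge_gapped _)
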